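-- pv_equiv track=rewrite | github.com/kosyachniy/spbu | olymp/2018/3.py | cht
-- ===== SOURCE A (Python) =====
-- def cht(x):
-- 	if len(x) > 1:
-- 		a, b = x[0], cht(x[1:])
-- 		if b == 2: return 2
-- 		c = abs((a + b) % 2)
-- 		if c == abs((a - b) % 2):
-- 			return c
-- 		else:
-- 			return 2
-- 	else:
-- 		return abs(x[0] % 2)
-- ===== SOURCE B (Python) =====
-- def cht(x):
--     return sum(x) % 2
-- ===== Notes on version B (the rewrite author's own statement) =====
-- stated objective: faster
-- what changed: Replaces A's O(n^2) recursion on slices (whose sticky-2 mismatch branch can never fire on integers, since (a+b)%2 == (a-b)%2 for b in {0,1}) with the closed form sum(x) % 2.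
import Mathlib
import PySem

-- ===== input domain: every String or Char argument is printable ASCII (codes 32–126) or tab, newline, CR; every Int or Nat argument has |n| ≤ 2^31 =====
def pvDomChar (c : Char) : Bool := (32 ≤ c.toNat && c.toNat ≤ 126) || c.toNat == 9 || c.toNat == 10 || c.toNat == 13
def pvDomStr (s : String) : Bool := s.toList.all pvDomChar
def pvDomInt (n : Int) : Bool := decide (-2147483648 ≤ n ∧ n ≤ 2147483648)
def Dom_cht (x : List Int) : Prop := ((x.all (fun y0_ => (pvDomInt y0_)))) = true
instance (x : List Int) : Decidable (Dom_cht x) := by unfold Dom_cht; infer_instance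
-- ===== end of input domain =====

-- B replaces A's quadratic recursion on slices with the closed form sum(x) % 2
-- (equal on every nonempty int list); on [] A raises IndexError and B returns 0.

-- ===== PORT A =====
def cht (x : List Int) : Int :=
  if PySem.List.len x > 1 then
    let a := PySem.List.pyGetD x 0 0
    let b := cht (PySem.List.slice x (some 1) none)
    if b = 2 then 2
    else
      let c := |PySem.Int.mod (a + b) 2|
      if c = |PySem.Int.mod (a - b) 2| then c else 2
  else |PySem.Int.mod (PySem.List.pyGetD x 0 0) 2|
termination_by x.length
decreasing_by
  simp only [PySem.List.slice_from_one, PySem.List.len_eq] at *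
  cases x <;> simp_all

-- ===== PORT B =====
def cht_alt (x : List Int) : Int := PySem.Int.mod x.sum 2

-- ===== PRECONDITION & SPEC =====
-- Pre_ excludes only the empty list, where A raises IndexError (x[0]).
def Pre_cht (x : List Int) : Prop := x ≠ []
instance (x : List Int) : Decidable (Pre_cht x) := by unfold Pre_cht; infer_instance
def pvWitness_cht : List Int := [3, -4, 7]

def Spec_cht (x : List Int) (out : Int) : Prop := out = cht_alt x
instance (x : List Int) (out : Int) : Decidable (Spec_cht x out) := by unfold Spec_cht; infer_instance

-- ===== CLAIM (what is proved, stated in full; the proofs are below) =====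
def Claim_equal_cht : Prop := ∀ (x : List Int), Dom_cht x → Pre_cht x → Spec_cht x (cht x)

-- ===== LEMMAS AND PROOFS =====

-- A's recursion computes the parity of the sum on every nonempty list.
theorem cht_eq_sum_mod : ∀ (x : List Int), x ≠ [] → cht x = PySem.Int.mod x.sum 2 := by
  have hm : ∀ e : Int, PySem.Int.mod e 2 = e % 2 :=
    fun e => PySem.Int.mod_eq_emod_of_pos (by norm_num)
  have habs : ∀ e : Int, |e % 2| = e % 2 :=
    fun e => abs_of_nonneg (Int.emod_nonneg e (by norm_num))
  intro x
  induction x with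
  | nil => intro h; exact absurd rfl h
  | cons a rest ih =>
    intro _
    rw [cht]
    cases rest with
    | nil =>
      simp only [PySem.List.len_eq, List.length_cons, List.length_nil,
        PySem.List.pyGetD_zero_cons, List.sum_cons, List.sum_nil, hm, habs]
      norm_num
    | cons r rs =>
      have hlen : PySem.List.len (a :: r :: rs) > 1 := by
        simp [PySem.List.len_eq]
      rw [if_pos hlen]
      simp only [PySem.List.slice_from_one, List.tail_cons, PySem.List.pyGetD_zero_cons]
      rw [ih (by simp)]
      simp only [hm, habs, List.sum_cons]
      split_ifs <;> omega

-- ===== VERDICT (by name: the statement is the Claim_ definition above) =====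
theorem cht_spec : Claim_equal_cht := by
  intro x _ hpre
  unfold Spec_cht cht_alt
  exact cht_eq_sum_mod x hpre
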